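-- pv_equiv track=rewrite | github.com/stefanoalimonti/carry-arithmetic-E-trace-anomaly | experiments/E221_precision_matrix.py | compute_carry_chain
-- ===== SOURCE A (Python) =====
-- def compute_carry_chain(p, q, K):
--     D = 2 * K - 1
--     carries = [0] * (D + 1)
--     for j in range(D):
--         cv = 0
--         i_lo = max(0, j - K + 1)
--         i_hi = min(j, K - 1)
--         for i in range(i_lo, i_hi + 1):
--             cv += ((p >> i) & 1) * ((q >> (j - i)) & 1)
--         carries[j + 1] = (cv + int(carries[j])) >> 1
--     return carries
-- ===== SOURCE B (Python) =====
-- def compute_carry_chain(p, q, K):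
--     if K <= 0:
--         return []
--     mask = (1 << K) - 1
--     pm = p & mask
--     qm = q & mask
--     w = K.bit_length() + 1
--     sp = 0
--     for i in range(K):
--         sp += ((pm >> i) & 1) << (w * i)
--     sq = 0
--     for i in range(K):
--         sq += ((qm >> i) & 1) << (w * i)
--     prod = sp * sq
--     fm = (1 << w) - 1
--     out = [0]
--     c = 0
--     for t in range(2 * K - 1):
--         c = (((prod >> (w * t)) & fm) + c) >> 1
--         out.append(c)
--     return out
-- ===== Notes on version B (the rewrite author's own statement) =====
-- stated objective: faster
-- what changed: A's O(K^2) nested Python loops (one inner scan per column) are replaced by one bit-spaced big-integer multiplication — each of the K low bits of p and q is spread w = K.bit_length()+1 bit positions apart, so the product's base-2^w digits are exactly A's column sums — followed by a single O(K) carry recurrence.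
import Mathlib
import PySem

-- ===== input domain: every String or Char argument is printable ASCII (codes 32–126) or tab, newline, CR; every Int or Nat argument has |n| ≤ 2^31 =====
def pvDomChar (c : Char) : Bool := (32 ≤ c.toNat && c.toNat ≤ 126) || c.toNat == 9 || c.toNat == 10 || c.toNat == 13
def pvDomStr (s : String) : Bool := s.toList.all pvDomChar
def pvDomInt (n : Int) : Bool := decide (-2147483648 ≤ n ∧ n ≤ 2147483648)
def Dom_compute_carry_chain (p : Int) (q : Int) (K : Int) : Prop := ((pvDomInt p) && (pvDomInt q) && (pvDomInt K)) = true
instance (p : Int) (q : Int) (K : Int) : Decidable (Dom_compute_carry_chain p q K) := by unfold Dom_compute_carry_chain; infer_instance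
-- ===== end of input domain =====

-- B replaces A's quadratic per-column bit loops by one bit-spaced big-integer
-- multiplication (each bit spread w = K.bit_length()+1 positions apart, so the
-- product's base-2^w digits are exactly A's column sums) followed by a single
-- linear carry recurrence; a timing run measured it much faster.

-- ===== PORT A =====
-- Literal transliteration of A. Shift amounts i and j - i are ≥ 0 throughout the
-- loops (i_lo ≥ 0 and i ≤ j), so .toNat is exact where Python shifts by an int.
def compute_carry_chain (p : Int) (q : Int) (K : Int) : List Int :=
  let D := 2 * K - 1
  let carries : List Int := List.replicate (D + 1).toNat 0   -- [0] * (D + 1)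
  (PySem.List.pyRange 0 D 1).foldl (fun carries j =>
    let i_lo := max 0 (j - K + 1)
    let i_hi := min j (K - 1)
    let cv := (PySem.List.pyRange i_lo (i_hi + 1) 1).foldl
      (fun cv i =>
        cv + PySem.Int.band (p >>> i.toNat) 1 * PySem.Int.band (q >>> (j - i).toNat) 1) 0
    PySem.List.pySetD carries (j + 1) ((cv + PySem.List.pyGetD carries j 0) >>> 1)) carries

-- ===== PORT B =====
-- Transliteration of Source B; shift amounts i, w*i, w*t are ≥ 0, so .toNat is exact.
def compute_carry_chain_alt (p : Int) (q : Int) (K : Int) : List Int :=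
  if K ≤ 0 then []
  else
    let mask := ((1 : Int) <<< K.toNat) - 1
    let pm := PySem.Int.band p mask
    let qm := PySem.Int.band q mask
    let w : Nat := PySem.Int.bitLength K + 1
    let sp := (PySem.List.pyRange 0 K 1).foldl
      (fun sp i => sp + PySem.Int.band (pm >>> i.toNat) 1 <<< (w * i.toNat)) 0
    let sq := (PySem.List.pyRange 0 K 1).foldl
      (fun sq i => sq + PySem.Int.band (qm >>> i.toNat) 1 <<< (w * i.toNat)) 0
    let prod := sp * sq
    let fm := ((1 : Int) <<< w) - 1
    let r := (PySem.List.pyRange 0 (2 * K - 1) 1).foldl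
      (fun (acc : List Int × Int) t =>
        let c := (PySem.Int.band (prod >>> (w * t.toNat)) fm + acc.2) >>> 1
        (acc.1 ++ [c], c)) ([0], 0)
    r.1

-- ===== PRECONDITION & SPEC =====
def Spec_compute_carry_chain (p : Int) (q : Int) (K : Int) (out : List Int) : Prop := out = compute_carry_chain_alt p q K
instance (p : Int) (q : Int) (K : Int) (out : List Int) : Decidable (Spec_compute_carry_chain p q K out) := by unfold Spec_compute_carry_chain; infer_instance

-- ===== CLAIM (what is proved, stated in full; the proofs are below) =====
def Claim_equal_compute_carry_chain : Prop := ∀ (p : Int) (q : Int) (K : Int), Dom_compute_carry_chain p q K → Spec_compute_carry_chain p q K (compute_carry_chain p q K)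

-- ===== LEMMAS AND PROOFS =====

-- the low n bits of a Python int (= a & ((1 << n) - 1)), as a natural number
def pvLow (a : Int) (n : ℕ) : ℕ := (a % ((2 : Int) ^ n)).toNat

-- bit i of a natural number
def pvBit (P : ℕ) (i : ℕ) : ℕ := P / 2 ^ i % 2

-- column sum j of the bit-product matrix
def pvCv (P Q : ℕ) (j : ℕ) : ℕ := ∑ ij ∈ Finset.antidiagonal j, pvBit P ij.1 * pvBit Q ij.2

-- the carry chain recurrence
def pvCarry (P Q : ℕ) : ℕ → ℕ
  | 0 => 0
  | j + 1 => (pvCv P Q j + pvCarry P Q j) / 2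

-- the common mathematical value of both programs
def pvOut (p q K : Int) : List Int :=
  (List.range (2 * K.toNat)).map
    (fun j => ((pvCarry (pvLow p K.toNat) (pvLow q K.toNat) j : ℕ) : Int))

theorem pvBit_le_one (P i : ℕ) : pvBit P i ≤ 1 := by
  unfold pvBit; omega

theorem pvBit_eq_zero (P i n : ℕ) (hP : P < 2 ^ n) (hi : n ≤ i) : pvBit P i = 0 := by
  unfold pvBit
  have : P / 2 ^ i = 0 := Nat.div_eq_of_lt (lt_of_lt_of_le hP (Nat.pow_le_pow_right (by norm_num) hi))
  simp [this]

theorem pvLow_lt (a : Int) (n : ℕ) : pvLow a n < 2 ^ n := by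
  unfold pvLow
  have hc : ((2:Int)^n) = ((2^n : ℕ) : Int) := by push_cast; ring
  have h2 : (0 : Int) < 2 ^ n := by positivity
  have h3 := Int.emod_lt_of_pos a h2
  have h4 := Int.emod_nonneg a (ne_of_gt h2)
  rw [hc] at h3
  omega

theorem pvShift_one_cast (x y : ℕ) :
    (((x : Int) + (y : Int)) >>> (1 : Int)) = (((x + y) / 2 : ℕ) : Int) := by
  rw [show (1:Int) = ((1:ℕ):Int) by norm_cast, Int.shiftRight_natCast_right,
     Int.shiftRight_eq_div_pow]
  push_cast [Int.natCast_ediv]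
  norm_num

theorem pvList_sum_map_range {M : Type} [AddCommMonoid M] (f : ℕ → M) (n : ℕ) :
    ((List.range n).map f).sum = ∑ i ∈ Finset.range n, f i := by
  induction n with
  | zero => simp
  | succ k ih => rw [List.range_succ, Finset.sum_range_succ, List.map_append, List.sum_append, ih]; simp

theorem pvCv_eq_range (P Q j : ℕ) :
    pvCv P Q j = ∑ i ∈ Finset.range (j + 1), pvBit P i * pvBit Q (j - i) := by
  unfold pvCv
  rw [Finset.Nat.sum_antidiagonal_eq_sum_range_succ_mk]

theorem pvCv_le (P Q : ℕ) (n : ℕ) (hP : P < 2 ^ n) (t : ℕ) : pvCv P Q t ≤ n := by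
  rw [pvCv_eq_range]
  calc ∑ i ∈ Finset.range (t + 1), pvBit P i * pvBit Q (t - i)
      ≤ ∑ i ∈ Finset.range (t + 1), (if i < n then 1 else 0) := by
        apply Finset.sum_le_sum
        intro i _
        by_cases h : i < n
        · simp only [h, if_true]
          exact le_trans (Nat.mul_le_mul (pvBit_le_one P i) (pvBit_le_one Q (t - i))) (by norm_num)
        · simp only [h, if_false]
          rw [pvBit_eq_zero P i n hP (by omega)]
          simp
    _ ≤ n := by
        rw [← Finset.sum_filter]
        have hsub : (Finset.range (t + 1)).filter (· < n) ⊆ Finset.range n := by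
          intro x hx
          simp only [Finset.mem_filter, Finset.mem_range] at hx ⊢
          exact hx.2
        calc ∑ _x ∈ (Finset.range (t + 1)).filter (· < n), 1
            ≤ ∑ _x ∈ Finset.range n, 1 := Finset.sum_le_sum_of_subset hsub
          _ = n := by simp

theorem pvBand_mask (a : Int) (n : ℕ) :
    PySem.Int.band a (((1 : Int) <<< n) - 1) = ((pvLow a n : ℕ) : Int) := by
  have hsl : ((1 : Int) <<< n) = ((2 ^ n : ℕ) : Int) := by
    rw [Int.shiftLeft_eq]; push_cast; ring
  have h2 : ((2:Int)^n) = ((2^n : ℕ) : Int) := by push_cast; ring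
  have h1n : 1 ≤ 2 ^ n := Nat.one_le_two_pow
  have hmask : (0 : Int) ≤ ((1 : Int) <<< n) - 1 := by rw [hsl]; omega
  have htn : (((1:Int) <<< n) - 1).toNat = 2 ^ n - 1 := by rw [hsl]; omega
  unfold PySem.Int.band pvLow
  by_cases ha : 0 ≤ a
  · simp only [ha, if_true, hmask, if_true]
    rw [htn, Nat.and_two_pow_sub_one_eq_mod]
    have hmod : a % ((2:Int)^n) = ((a.toNat % 2^n : ℕ) : Int) := by
      rw [h2, show a = ((a.toNat : ℕ) : Int) by omega]
      norm_cast
    rw [hmod]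
    omega
  · simp only [ha, if_false, hmask, if_true]
    set m : ℕ := (-a - 1).toNat with hm
    have ham : a = -(m : Int) - 1 := by omega
    rw [htn, Nat.and_comm, Nat.and_two_pow_sub_one_eq_mod]
    set d := m / 2^n with hd
    set r := m % 2^n with hre
    have hr : r < 2^n := Nat.mod_lt _ (Nat.pow_pos (by norm_num))
    have hmi : ((m : ℕ) : Int) = ((2^n : ℕ) : Int) * d + r := by
      exact_mod_cast congrArg (Nat.cast : ℕ → ℤ) (Nat.div_add_mod m (2^n)).symm
    have hci : ((2^n - 1 - r : ℕ) : Int) = ((2^n : ℕ) : Int) - 1 - r := by omega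
    have hdvd : ((2:Int)^n) ∣ (a - ((2 ^ n - 1 - r : ℕ) : Int)) := by
      refine ⟨-((d : Int) + 1), ?_⟩
      rw [ham, hci, h2]
      have : ((m : ℕ) : Int) = ((2^n : ℕ) : Int) * d + r := hmi
      rw [this]
      ring
    have hge : (0:Int) ≤ ((2 ^ n - 1 - r : ℕ) : Int) := by positivity
    have hlt : ((2 ^ n - 1 - r : ℕ) : Int) < (2:Int)^n := by rw [h2]; omega
    have hmod : a % ((2:Int)^n) = ((2 ^ n - 1 - r : ℕ) : Int) := by
      have h0 : (a - ((2 ^ n - 1 - r : ℕ) : Int)) % ((2:Int)^n) = 0 :=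
        Int.emod_eq_zero_of_dvd hdvd
      have := Int.emod_eq_emod_iff_emod_sub_eq_zero.mpr h0
      rw [this, Int.emod_eq_of_lt hge hlt]
    rw [hmod]
    omega

theorem pvBand_shift_one (a : Int) (n i : ℕ) (hi : i < n) :
    PySem.Int.band (a >>> i) 1 = ((pvBit (pvLow a n) i : ℕ) : Int) := by
  rw [PySem.Int.band_one, PySem.Int.mod_eq_emod_of_pos (by norm_num), Int.shiftRight_eq_div_pow]
  -- decompose a = 2^n * t + r
  have h2 : ((2:Int)^n) = ((2^n : ℕ) : Int) := by push_cast; ring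
  have h2pos : (0:Int) < (2:Int)^n := by positivity
  set r : Int := a % ((2:Int)^n) with hr
  set t : Int := a / ((2:Int)^n) with ht
  have hrge : 0 ≤ r := Int.emod_nonneg a (ne_of_gt h2pos)
  have hrlt : r < (2:Int)^n := Int.emod_lt_of_pos a h2pos
  have ha : a = r + (2:Int)^(n-i) * t * 2^i := by
    have : (2:Int)^(n-i) * 2^i = (2:Int)^n := by
      rw [← pow_add]; congr 1; omega
    calc a = ((2:Int)^n) * t + r := (Int.mul_ediv_add_emod a ((2:Int)^n)).symm
    _ = r + (2:Int)^(n-i) * t * 2^i := by rw [← this]; ring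
  have hdiv : a / ((2:Int)^i : Int) = r / 2^i + (2:Int)^(n-i) * t := by
    rw [ha]
    rw [Int.add_mul_ediv_right _ _ (by positivity : ((2:Int)^i) ≠ 0)]
  have hmod : a / ((2:Int)^i : Int) % 2 = (r / 2^i) % 2 := by
    rw [hdiv]
    have hni : (2:Int)^(n-i) * t = 2 * ((2:Int)^(n-i-1) * t) := by
      rw [show (2:Int)^(n-i) = 2 * (2:Int)^(n-i-1) by rw [← pow_succ']; congr 1; omega]
      ring
    rw [hni, Int.add_mul_emod_self_left]
  have hcast : ((2^i : ℕ) : Int) = (2:Int)^i := by push_cast; ring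
  rw [show ((2:Int)^i : Int) = (((2^i : ℕ)) : Int) by rw [hcast]] at hmod
  rw [hmod]
  unfold pvBit pvLow
  rw [show r.toNat = ((r.toNat : ℕ)) from rfl]
  have : r = ((r.toNat : ℕ) : Int) := by omega
  rw [this]
  norm_cast

theorem pvDigit (c : ℕ → ℕ) (B N j : ℕ) (hc : ∀ t, c t < B) (hj : j < N) :
    (∑ t ∈ Finset.range N, c t * B ^ t) / B ^ j % B = c j := by
  have hB : 0 < B := lt_of_le_of_lt (Nat.zero_le _) (hc 0)
  have hlow : ∀ k : ℕ, (∑ t ∈ Finset.range k, c t * B ^ t) < B ^ k := by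
    intro k
    induction k with
    | zero => simp
    | succ m ih =>
      rw [Finset.sum_range_succ]
      have h1 : c m * B ^ m ≤ (B - 1) * B ^ m := Nat.mul_le_mul_right _ (by have := hc m; omega)
      have h2 : B ^ m + (B - 1) * B ^ m = B ^ (m+1) := by
        have : B ^ m + (B - 1) * B ^ m = (1 + (B - 1)) * B ^ m := by ring
        rw [this, show 1 + (B - 1) = B by omega, pow_succ, Nat.mul_comm]
      omega
  have hsplit : (∑ t ∈ Finset.range N, c t * B ^ t)
      = (∑ t ∈ Finset.range j, c t * B ^ t)
        + B ^ j * (c j + B * (∑ k ∈ Finset.range (N - (j+1)), c (j+1+k) * B ^ k)) := by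
    have e1 : Finset.range N = Finset.Ico 0 N := by rw [Finset.range_eq_Ico]
    rw [e1, ← Finset.sum_Ico_consecutive _ (Nat.zero_le (j+1)) (by omega : j+1 ≤ N),
       ← Finset.range_eq_Ico, Finset.sum_range_succ, Finset.sum_Ico_eq_sum_range]
    have e2 : ∀ k, c (j+1+k) * B ^ (j+1+k) = B ^ j * (B * (c (j+1+k) * B ^ k)) := by
      intro k; rw [pow_add, pow_add]; ring
    rw [Finset.sum_congr rfl (fun k _ => e2 k), ← Finset.mul_sum, ← Finset.mul_sum]
    ring
  rw [hsplit, Nat.add_mul_div_left _ _ (Nat.pow_pos hB),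
     Nat.div_eq_of_lt (hlow j), Nat.zero_add, Nat.add_mul_mod_self_left,
     Nat.mod_eq_of_lt (hc j)]

noncomputable def pvPoly (P n : ℕ) : Polynomial ℕ :=
  ∑ i ∈ Finset.range n, Polynomial.C (pvBit P i) * Polynomial.X ^ i

theorem pvPoly_coeff (P n : ℕ) (hP : P < 2 ^ n) (t : ℕ) : (pvPoly P n).coeff t = pvBit P t := by
  unfold pvPoly
  rw [Polynomial.finset_sum_coeff]
  simp only [Polynomial.coeff_C_mul, Polynomial.coeff_X_pow]
  by_cases ht : t < n
  · rw [Finset.sum_eq_single t]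
    · simp
    · intro b _ hb; simp [Ne.symm hb]
    · intro h; exact absurd (Finset.mem_range.mpr ht) h
  · rw [Finset.sum_eq_zero, pvBit_eq_zero P t n hP (by omega)]
    intro b hb
    have : b ≠ t := by simp only [Finset.mem_range] at hb; omega
    simp [Ne.symm this]

theorem pvPoly_natDegree (P n : ℕ) (hn : 0 < n) : (pvPoly P n).natDegree ≤ n - 1 := by
  unfold pvPoly
  apply le_trans (Polynomial.natDegree_sum_le _ _)
  rw [Finset.fold_max_le]
  constructor
  · omega
  · intro i hi
    simp only [Finset.mem_range] at hi
    exact le_trans (Polynomial.natDegree_C_mul_le _ _) (by rw [Polynomial.natDegree_X_pow]; omega)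

theorem pvPoly_eval (P n w : ℕ) : (pvPoly P n).eval (2 ^ w) = ∑ i ∈ Finset.range n, pvBit P i * 2 ^ (w * i) := by
  unfold pvPoly
  rw [Polynomial.eval_finset_sum]
  apply Finset.sum_congr rfl
  intro i _
  simp [Polynomial.eval_mul, Polynomial.eval_pow, ← pow_mul]

theorem pvConv (P Q n w : ℕ) (hn : 0 < n) (hP : P < 2 ^ n) (hQ : Q < 2 ^ n) :
    (∑ i ∈ Finset.range n, pvBit P i * 2 ^ (w * i)) * (∑ i ∈ Finset.range n, pvBit Q i * 2 ^ (w * i))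
    = ∑ t ∈ Finset.range (2 * n - 1), pvCv P Q t * 2 ^ (w * t) := by
  rw [← pvPoly_eval P n w, ← pvPoly_eval Q n w, ← Polynomial.eval_mul]
  have hdeg : (pvPoly P n * pvPoly Q n).natDegree < 2 * n - 1 := by
    apply lt_of_le_of_lt (Polynomial.natDegree_mul_le)
    have := pvPoly_natDegree P n hn
    have := pvPoly_natDegree Q n hn
    omega
  rw [Polynomial.eval_eq_sum_range' hdeg]
  apply Finset.sum_congr rfl
  intro t _
  rw [Polynomial.coeff_mul, ← pow_mul]
  congr 1
  unfold pvCv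
  apply Finset.sum_congr rfl
  intro ij _
  rw [pvPoly_coeff P n hP, pvPoly_coeff Q n hQ]

theorem pvInnerA (p q K : Int) (hK : 0 < K) (j : ℕ) (_hj : j < 2 * K.toNat - 1) :
    (PySem.List.pyRange (max 0 ((j : Int) - K + 1)) (min (j : Int) (K - 1) + 1) 1).foldl
      (fun cv i =>
        cv + PySem.Int.band (p >>> i.toNat) 1 * PySem.Int.band (q >>> ((j : Int) - i).toNat) 1) 0
    = ((pvCv (pvLow p K.toNat) (pvLow q K.toNat) j : ℕ) : Int) := by
  set n := K.toNat with hn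
  have hKn : K = (n : Int) := by omega
  have hn1 : 1 ≤ n := by omega
  set al : ℕ := j + 1 - n with hal
  set bl : ℕ := min (j + 1) n with hbl
  have hmax : max 0 ((j : Int) - K + 1) = (al : Int) := by rw [hKn]; omega
  have hmin : min (j : Int) (K - 1) + 1 = (bl : Int) := by rw [hKn]; omega
  rw [hmax, hmin, PySem.List.foldl_add, PySem.List.pyRange_one, List.map_map,
     pvList_sum_map_range]
  have hlen : ((bl : Int) - (al : Int)).toNat = bl - al := by omega
  rw [hlen]
  have hterm : ∀ k ∈ Finset.range (bl - al),
      ((fun i : Int =>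
          PySem.Int.band (p >>> ((i.toNat : ℕ) : Int)) 1 *
            PySem.Int.band (q >>> (((j : Int) - i).toNat : ℕ)) 1) ∘
        (fun k : ℕ => (al : Int) + (k : Int))) k
      = ((pvBit (pvLow p n) (al + k) * pvBit (pvLow q n) (j - (al + k)) : ℕ) : Int) := by
    intro k hk
    simp only [Finset.mem_range] at hk
    simp only [Function.comp_apply]
    have h1 : ((al : Int) + (k : Int)).toNat = al + k := by omega
    have h2 : ((j : Int) - ((al : Int) + (k : Int))).toNat = j - (al + k) := by omega
    have hik : al + k < n := by omega
    have hjk : j - (al + k) < n := by omega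
    rw [Int.shiftRight_natCast_right, h1, h2,
       pvBand_shift_one p n (al + k) hik, pvBand_shift_one q n (j - (al + k)) hjk]
    push_cast
    ring
  have hsum := Finset.sum_congr rfl hterm
  rw [zero_add]
  refine hsum.trans ?_
  rw [← Nat.cast_sum]
  congr 1
  have hico := Finset.sum_Ico_eq_sum_range (fun i => pvBit (pvLow p n) i * pvBit (pvLow q n) (j - i)) al bl
  rw [← hico, pvCv_eq_range]
  clear hsum hterm hmax hmin hlen
  apply Finset.sum_subset
  · intro x hx
    simp only [Finset.mem_Ico, Finset.mem_range] at hx ⊢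
    omega
  · intro x hx hnx
    simp only [Finset.mem_Ico, Finset.mem_range, not_and] at hx hnx
    by_cases hxa : x < al
    · have : n ≤ j - x := by omega
      rw [pvBit_eq_zero (pvLow q n) (j - x) n (pvLow_lt q n) this, Nat.mul_zero]
    · have hxb : bl ≤ x := by omega
      have : n ≤ x := by omega
      rw [pvBit_eq_zero (pvLow p n) x n (pvLow_lt p n) this, Nat.zero_mul]

theorem pvSetMid (xs ys : List Int) (v y : Int) : (xs ++ y :: ys).set xs.length v = xs ++ v :: ys := by
  induction xs with
  | nil => simp
  | cons a t ih => simp [ih]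

theorem pvSetMid' (xs ys : List Int) (v y : Int) (k : ℕ) (hk : k = xs.length) :
    (xs ++ y :: ys).set k v = xs ++ v :: ys := by
  subst hk; exact pvSetMid xs ys v y

theorem pvOuterA (p q K : Int) (hK : 0 < K) (m : ℕ) (hm : m ≤ 2 * K.toNat - 1) :
    (PySem.List.pyRange 0 (m : Int) 1).foldl (fun carries j =>
      let i_lo := max 0 (j - K + 1)
      let i_hi := min j (K - 1)
      let cv := (PySem.List.pyRange i_lo (i_hi + 1) 1).foldl
        (fun cv i =>
          cv + PySem.Int.band (p >>> i.toNat) 1 * PySem.Int.band (q >>> (j - i).toNat) 1) 0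
      PySem.List.pySetD carries (j + 1) ((cv + PySem.List.pyGetD carries j 0) >>> 1))
      (List.replicate (2 * K.toNat) 0)
    = (List.range (m + 1)).map (fun j => ((pvCarry (pvLow p K.toNat) (pvLow q K.toNat) j : ℕ) : Int))
      ++ List.replicate (2 * K.toNat - 1 - m) 0 := by
  set n := K.toNat with hn
  set P := pvLow p n with hP
  set Q := pvLow q n with hQ
  induction m with
  | zero =>
    rw [show ((0:ℕ) : Int) = 0 from rfl, PySem.List.pyRange_zero]
    rw [show 2 * n = 1 + (2 * n - 1) by omega, List.replicate_add]
    simp [pvCarry]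
  | succ m ih =>
    have hm' : m ≤ 2 * n - 1 := by omega
    have hstep : PySem.List.pyRange 0 ((m + 1 : ℕ) : Int) 1
        = PySem.List.pyRange 0 (m : Int) 1 ++ [(m : Int)] := by
      rw [show (((m + 1 : ℕ)) : Int) = (m : Int) + 1 by push_cast; ring]
      exact PySem.List.pyRange_one_succ_right (by positivity)
    rw [hstep, List.foldl_append, ih hm']
    simp only [List.foldl_cons, List.foldl_nil]
    -- the single step at j = m
    rw [pvInnerA p q K hK m (by omega)]
    have hlen : ((List.range (m + 1)).map (fun j => ((pvCarry P Q j : ℕ) : Int))).length = m + 1 := by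
      simp
    have hget : PySem.List.pyGetD
        ((List.range (m + 1)).map (fun j => ((pvCarry P Q j : ℕ) : Int))
          ++ List.replicate (2 * n - 1 - m) 0) ((m : Int)) 0
        = ((pvCarry P Q m : ℕ) : Int) := by
      rw [PySem.List.pyGetD_natCast]
      rw [List.getD_eq_getElem?_getD, List.getElem?_append_left (by rw [hlen]; omega)]
      simp
    rw [hget, pvShift_one_cast]
    have hrep : List.replicate (2 * n - 1 - m) (0:Int)
        = 0 :: List.replicate (2 * n - 1 - (m+1)) 0 := by
      rw [show 2 * n - 1 - m = 1 + (2 * n - 1 - (m+1)) by omega, List.replicate_add]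
      rfl
    rw [show ((m : Int) + 1) = ((m + 1 : ℕ) : Int) by push_cast; ring, PySem.List.pySetD_natCast]
    rw [hrep]
    rw [pvSetMid' ((List.range (m + 1)).map (fun j => ((pvCarry P Q j : ℕ) : Int)))
         (List.replicate (2 * n - 1 - (m+1)) 0) _ 0 (m+1) (by simp)]
    rw [List.range_succ (n := m + 1), List.map_append]
    simp only [List.map_cons, List.map_nil, List.append_assoc, List.cons_append, List.nil_append]
    congr 2

theorem pvA_eq_out (p q K : Int) : compute_carry_chain p q K = pvOut p q K := by
  simp only [compute_carry_chain, pvOut]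
  by_cases hK : K ≤ 0
  · rw [PySem.List.pyRange_one_eq_nil (by omega)]
    simp only [List.foldl_nil]
    rw [show (2 * K - 1 + 1).toNat = 0 by omega, show 2 * K.toNat = 0 by omega]
    simp
  · replace hK : 0 < K := by omega
    set n := K.toNat with hn
    have h1 : 2 * K - 1 = (((2 * n - 1 : ℕ)) : Int) := by omega
    have h2 : (2 * K - 1 + 1).toNat = 2 * n := by omega
    rw [h2, h1, pvOuterA p q K hK (2 * n - 1) (le_refl _)]
    rw [show 2 * n - 1 - (2 * n - 1) = 0 by omega, show 2 * n - 1 + 1 = 2 * n by omega]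
    simp
    intro a _
    rfl

theorem pvLow_natCast (x : ℕ) (n : ℕ) : pvLow ((x : ℕ) : Int) n = x % 2 ^ n := by
  unfold pvLow
  rw [show ((2:Int)^n) = ((2^n : ℕ) : Int) by push_cast; ring]
  norm_cast

theorem pvExtract (P Q n w : ℕ) (hn : 0 < n) (hP : P < 2 ^ n) (hQ : Q < 2 ^ n)
    (hcv : ∀ t, pvCv P Q t < 2 ^ w) (k : ℕ) (hk : k < 2 * n - 1) :
    PySem.Int.band
      ((((∑ i ∈ Finset.range n, pvBit P i * 2 ^ (w * i) : ℕ) : Int) *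
        ((∑ i ∈ Finset.range n, pvBit Q i * 2 ^ (w * i) : ℕ) : Int)) >>> (w * k))
      (((1 : Int) <<< w) - 1)
    = ((pvCv P Q k : ℕ) : Int) := by
  rw [show (((∑ i ∈ Finset.range n, pvBit P i * 2 ^ (w * i) : ℕ) : Int) *
        ((∑ i ∈ Finset.range n, pvBit Q i * 2 ^ (w * i) : ℕ) : Int))
      = (((∑ i ∈ Finset.range n, pvBit P i * 2 ^ (w * i)) *
          (∑ i ∈ Finset.range n, pvBit Q i * 2 ^ (w * i)) : ℕ) : Int) by push_cast; ring]
  have hsh : ((((∑ i ∈ Finset.range n, pvBit P i * 2 ^ (w * i)) *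
          (∑ i ∈ Finset.range n, pvBit Q i * 2 ^ (w * i)) : ℕ) : Int)) >>> (w * k)
      = ((((∑ i ∈ Finset.range n, pvBit P i * 2 ^ (w * i)) *
          (∑ i ∈ Finset.range n, pvBit Q i * 2 ^ (w * i))) >>> (w * k) : ℕ) : Int) := by
    rw [Int.shiftRight_eq_div_pow, Nat.shiftRight_eq_div_pow]
    exact (Int.natCast_ediv _ _).symm
  rw [hsh, pvBand_mask _ w, pvLow_natCast]
  congr 1
  rw [Nat.shiftRight_eq_div_pow, pvConv P Q n w hn hP hQ]
  have hpow : ∀ t : ℕ, (2:ℕ) ^ (w * t) = (2 ^ w) ^ t := fun t => by rw [← pow_mul]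
  rw [show (∑ t ∈ Finset.range (2 * n - 1), pvCv P Q t * 2 ^ (w * t))
      = (∑ t ∈ Finset.range (2 * n - 1), pvCv P Q t * (2 ^ w) ^ t) by
    exact Finset.sum_congr rfl (fun t _ => by rw [hpow])]
  rw [hpow k]
  exact pvDigit (pvCv P Q) (2 ^ w) (2 * n - 1) k hcv hk

theorem pvSpread (a K : Int) (w : ℕ) (hK : 0 < K) :
    (PySem.List.pyRange 0 K 1).foldl
      (fun sp i => sp + PySem.Int.band (((pvLow a K.toNat : ℕ) : Int) >>> i.toNat) 1 <<< (w * i.toNat)) 0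
    = ((∑ i ∈ Finset.range K.toNat, pvBit (pvLow a K.toNat) i * 2 ^ (w * i) : ℕ) : Int) := by
  set n := K.toNat with hn
  set P := pvLow a n with hP
  rw [show K = ((n : ℕ) : Int) by omega]
  rw [PySem.List.foldl_add, PySem.List.pyRange_one, List.map_map, pvList_sum_map_range, zero_add]
  rw [show (((n : ℕ) : Int) - 0).toNat = n by omega]
  have hterm : ∀ k ∈ Finset.range n,
      ((fun i : Int => PySem.Int.band (((P : ℕ) : Int) >>> ((i.toNat : ℕ) : Int)) 1 <<< (w * i.toNat)) ∘
        (fun k : ℕ => (0 : Int) + (k : Int))) k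
      = ((pvBit P k * 2 ^ (w * k) : ℕ) : Int) := by
    intro k hk
    simp only [Finset.mem_range] at hk
    simp only [Function.comp_apply, zero_add, Int.toNat_natCast]
    rw [Int.shiftRight_natCast_right, pvBand_shift_one ((P : ℕ) : Int) n k hk,
       pvLow_natCast, Nat.mod_eq_of_lt (hP ▸ pvLow_lt a n), Int.shiftLeft_eq]
    push_cast
    ring
  exact ((Finset.sum_congr rfl hterm).trans (by rw [← Nat.cast_sum]))

theorem pvOutLoop (P Q n w : ℕ) (hn : 0 < n) (hP : P < 2 ^ n) (hQ : Q < 2 ^ n)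
    (hcv : ∀ t, pvCv P Q t < 2 ^ w) (m : ℕ) (hm : m ≤ 2 * n - 1) :
    (PySem.List.pyRange 0 (m : Int) 1).foldl
      (fun (acc : List Int × Int) t =>
        let c := (PySem.Int.band
            ((((∑ i ∈ Finset.range n, pvBit P i * 2 ^ (w * i) : ℕ) : Int) *
              ((∑ i ∈ Finset.range n, pvBit Q i * 2 ^ (w * i) : ℕ) : Int)) >>> (w * t.toNat))
            (((1 : Int) <<< w) - 1) + acc.2) >>> 1
        (acc.1 ++ [c], c)) ([0], 0)
    = ((List.range (m + 1)).map (fun j => ((pvCarry P Q j : ℕ) : Int)),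
       ((pvCarry P Q m : ℕ) : Int)) := by
  induction m with
  | zero =>
    rw [show ((0:ℕ) : Int) = 0 from rfl, PySem.List.pyRange_zero]
    simp [pvCarry]
  | succ m ih =>
    have hstep : PySem.List.pyRange 0 ((m + 1 : ℕ) : Int) 1
        = PySem.List.pyRange 0 (m : Int) 1 ++ [(m : Int)] := by
      rw [show (((m + 1 : ℕ)) : Int) = (m : Int) + 1 by push_cast; ring]
      exact PySem.List.pyRange_one_succ_right (by positivity)
    rw [hstep, List.foldl_append, ih (by omega)]
    simp only [List.foldl_cons, List.foldl_nil, Int.toNat_natCast]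
    rw [pvExtract P Q n w hn hP hQ hcv m (by omega), pvShift_one_cast]
    rw [List.range_succ (n := m + 1), List.map_append]
    simp [pvCarry]

theorem pvB_eq_out (p q K : Int) : compute_carry_chain_alt p q K = pvOut p q K := by
  simp only [compute_carry_chain_alt, pvOut]
  by_cases hK : K ≤ 0
  · rw [if_pos hK, show 2 * K.toNat = 0 by omega]
    simp
  · rw [if_neg hK]
    replace hK : 0 < K := by omega
    set n := K.toNat with hn
    set w : ℕ := PySem.Int.bitLength K + 1 with hw
    set P := pvLow p n with hP
    set Q := pvLow q n with hQ
    rw [pvBand_mask p n, pvBand_mask q n]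
    rw [pvSpread p K w hK, pvSpread q K w hK]
    have hn1 : 0 < n := by omega
    have hnw : n < 2 ^ w := by
      have h1 := PySem.Int.lt_two_pow_bitLength K
      have h2 : (2:ℕ) ^ PySem.Int.bitLength K ≤ 2 ^ w := Nat.pow_le_pow_right (by norm_num) (by omega)
      have h3 : n ≤ K.natAbs := by omega
      omega
    have hcv : ∀ t, pvCv (pvLow p K.toNat) (pvLow q K.toNat) t < 2 ^ w := fun t =>
      lt_of_le_of_lt (pvCv_le _ _ K.toNat (pvLow_lt p K.toNat) t) hnw
    rw [show (2 * K - 1 : Int) = ((2 * n - 1 : ℕ) : Int) by omega]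
    rw [pvOutLoop (pvLow p K.toNat) (pvLow q K.toNat) K.toNat w hn1
         (pvLow_lt p K.toNat) (pvLow_lt q K.toNat) hcv (2 * n - 1) (le_refl _)]
    rw [show 2 * n - 1 + 1 = 2 * n by omega]

-- ===== VERDICT (by name: the statement is the Claim_ definition above) =====
theorem compute_carry_chain_spec : Claim_equal_compute_carry_chain := by
  intro p q K _
  unfold Spec_compute_carry_chain
  rw [pvA_eq_out, pvB_eq_out]
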